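-- pv_equiv track=rewrite | github.com/TheFenrisLycaon/DSA-C-- | companies/Wow/v.py | solve
-- ===== SOURCE A (Python) =====
-- def solve(n):
--     def util(n, mapp):
--         if n in mapp:
--             return mapp[n]
--         if n == 1:
--             mapp[n] = 1
--         elif n % 2 == 0:
--             mapp[n] = 1 + util(n // 2, mapp)
--         else:
--             mapp[n] = 1 + util(3 * n + 1, mapp)
--
--         return mapp[n]
--
--     mapp = {}
--
--     util(n, mapp)
--
--     num, l = -1, 0
--
--     for i in range(1, n):
--         if i not in mapp:
--             util(i, mapp)
--
--         maxx = mapp[i]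
--
--         if l < maxx:
--             l = maxx
--             num = i
--
--     return num
-- ===== SOURCE B (Python) =====
-- def solve(n):
--     mapp = {1: 1}
--
--     def length(v):
--         # walk the Collatz step until a memoized value, stacking unseen values
--         path = []
--         while v not in mapp:
--             path.append(v)
--             v = v // 2 if v % 2 == 0 else 3 * v + 1
--         l = mapp[v]
--         # pop backwards, back-filling lengths into the shared memo
--         while path:
--             u = path.pop()
--             l += 1
--             mapp[u] = l
--         return l
--
--     length(n)
--
--     num, l = -1, 0
--     for i in range(1, n):
--         maxx = length(i)
--         if l < maxx:
--             l = maxx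
--             num = i
--     return num
-- ===== Notes on version B (the rewrite author's own statement) =====
-- stated objective: alternative
-- what changed: The recursive memoized util is replaced by an iterative helper that walks the Collatz step pushing unseen values on an explicit path stack until a memoized value, then pops backwards back-filling lengths; the memo is primed with {1:1}, the 'i not in mapp' guard disappears, and deep call-stack recursion is avoided.
import Mathlib
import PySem

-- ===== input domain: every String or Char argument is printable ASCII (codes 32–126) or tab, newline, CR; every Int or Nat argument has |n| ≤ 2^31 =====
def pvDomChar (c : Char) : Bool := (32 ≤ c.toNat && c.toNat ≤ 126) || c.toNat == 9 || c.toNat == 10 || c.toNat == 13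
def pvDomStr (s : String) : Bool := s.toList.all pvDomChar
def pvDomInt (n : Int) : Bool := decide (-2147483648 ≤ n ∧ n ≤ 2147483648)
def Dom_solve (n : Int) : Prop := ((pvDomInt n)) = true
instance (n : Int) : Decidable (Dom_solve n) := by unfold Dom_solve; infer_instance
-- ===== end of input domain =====

-- B replaces A's recursive memoized Collatz-length helper by an iterative walk with an
-- explicit path stack that back-fills the shared memo (objective: alternative, same cost).
-- Both ports render the Python memo dict as Std.HashMap Int Int: the Pythons only ever
-- look keys up and overwrite-free insert, and only an Int escapes, so insertion order is
-- never observed and HashMap lookup/insert is exact for these dicts (an association list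
-- would make evaluation of the port quadratic).  Both ports use a fuel counter only to
-- make the (conjecturally terminating) Collatz recursion total in Lean; it is not part
-- of either Python.

def pvFuel : Nat := 1000000

-- ===== PORT A =====
def utilA : Nat → Int → Std.HashMap Int Int → Option (Int × Std.HashMap Int Int)
  | 0, _, _ => none
  | f+1, n, d =>
    match d[n]? with
    | some v => some (v, d)
    | none =>
      if n = 1 then
        let d2 := d.insert n 1
        some (d2.getD n 0, d2)
      else if PySem.Int.mod n 2 = 0 then
        match utilA f (PySem.Int.floordiv n 2) d with
        | none => none
        | some (v, d1) =>
          let d2 := d1.insert n (1 + v)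
          some (d2.getD n 0, d2)
      else
        match utilA f (3 * n + 1) d with
        | none => none
        | some (v, d1) =>
          let d2 := d1.insert n (1 + v)
          some (d2.getD n 0, d2)

def loopA : List Int → Int → Int → Std.HashMap Int Int → Option Int
  | [], num, _, _ => some num
  | i :: rest, num, l, d =>
    match (match d[i]? with
           | some _ => some d
           | none => (utilA pvFuel i d).map (fun r : Int × Std.HashMap Int Int => r.2)) with
    | none => none
    | some d1 =>
      let maxx := d1.getD i 0
      if l < maxx then loopA rest i maxx d1 else loopA rest num l d1

def solve (n : Int) : Int :=
  match utilA pvFuel n (Std.HashMap.emptyWithCapacity : Std.HashMap Int Int) with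
  | none => -1
  | some (_, d) => (loopA (PySem.List.pyRange 1 n 1) (-1) 0 d).getD (-1)

-- ===== PORT B =====
def pvStep (v : Int) : Int :=
  if PySem.Int.mod v 2 = 0 then PySem.Int.floordiv v 2 else 3 * v + 1

-- the `while v not in mapp` walk, collecting the path of unseen values
def pathB : Nat → Int → Std.HashMap Int Int → Option (List Int × Int)
  | 0, _, _ => none
  | f+1, v, d =>
    match d[v]? with
    | some _ => some ([], v)
    | none => (pathB f (pvStep v) d).map (fun pb => (v :: pb.1, pb.2))

-- the `while path:` pop-and-assign loop (popping = folding over the reversed path)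
def backfill (p : List Int) (l : Int) (d : Std.HashMap Int Int) : Int × Std.HashMap Int Int :=
  p.foldl (fun s u => (s.1 + 1, s.2.insert u (s.1 + 1))) (l, d)

def lengthB (f : Nat) (v : Int) (d : Std.HashMap Int Int) : Option (Int × Std.HashMap Int Int) :=
  (pathB f v d).map (fun pb => backfill pb.1.reverse (d.getD pb.2 0) d)

def loopB : List Int → Int → Int → Std.HashMap Int Int → Option Int
  | [], num, _, _ => some num
  | i :: rest, num, l, d =>
    match lengthB pvFuel i d with
    | none => none
    | some (maxx, d1) => if l < maxx then loopB rest i maxx d1 else loopB rest num l d1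

def solve_alt (n : Int) : Int :=
  -- mapp = {1: 1}
  match lengthB pvFuel n ((Std.HashMap.emptyWithCapacity : Std.HashMap Int Int).insert 1 1) with
  | none => -1
  | some (_, d) => (loopB (PySem.List.pyRange 1 n 1) (-1) 0 d).getD (-1)

-- ===== PRECONDITION & SPEC =====
-- Pre_ excludes n ≤ 0, on which Python A recurses forever on the non-positive Collatz
-- orbit and dies with RecursionError.
def Pre_solve (n : Int) : Prop := 1 ≤ n
instance (n : Int) : Decidable (Pre_solve n) := by unfold Pre_solve; infer_instance
def pvWitness_solve : Int := 5

def Spec_solve (n : Int) (out : Int) : Prop := out = solve_alt n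
instance (n : Int) (out : Int) : Decidable (Spec_solve n out) := by unfold Spec_solve; infer_instance

-- ===== CLAIM (what is proved, stated in full; the proofs are below) =====
def Claim_equal_solve : Prop := ∀ (n : Int), Dom_solve n → Pre_solve n → Spec_solve n (solve n)

-- ===== LEMMAS AND PROOFS =====

theorem hmGet_insert_of_ne (d : Std.HashMap Int Int) {k k' : Int} (v : Int) (h : k' ≠ k) :
    (d.insert k v)[k']? = d[k']? := by
  simp [Std.HashMap.getElem?_insert, Ne.symm h]

theorem lengthB_memo (f : Nat) (hf : 0 < f) (i v : Int) (d : Std.HashMap Int Int)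
    (h : d[i]? = some v) : lengthB f i d = some (v, d) := by
  cases f with
  | zero => omega
  | succ f => simp [lengthB, pathB, h, backfill, Std.HashMap.getD_eq_getD_getElem?]

theorem lengthB_unfold (f : Nat) (n : Int) (d : Std.HashMap Int Int)
    (h : d[n]? = none) :
    lengthB (f+1) n d =
      (lengthB f (pvStep n) d).map
        (fun r => (r.1 + 1, r.2.insert n (r.1 + 1))) := by
  simp only [lengthB, pathB, h]
  cases hp : pathB f (pvStep n) d with
  | none => simp
  | some pb => simp [backfill]

theorem utilA_unfold (f : Nat) (n : Int) (d : Std.HashMap Int Int)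
    (h : d[n]? = none) (hn1 : n ≠ 1) :
    utilA (f+1) n d =
      (utilA f (pvStep n) d).map
        (fun r => (1 + r.1, r.2.insert n (1 + r.1))) := by
  by_cases hpar : PySem.Int.mod n 2 = 0
  · have hs : pvStep n = PySem.Int.floordiv n 2 := by unfold pvStep; rw [if_pos hpar]
    rw [hs]
    simp only [utilA, h]
    rw [if_neg hn1, if_pos hpar]
    cases hu : utilA f (PySem.Int.floordiv n 2) d with
    | none => simp only [Option.map_none]
    | some r =>
      obtain ⟨v, d1⟩ := r
      simp only [Option.map_some]
      rw [Std.HashMap.getD_insert_self]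
  · have hs : pvStep n = 3 * n + 1 := by unfold pvStep; rw [if_neg hpar]
    rw [hs]
    simp only [utilA, h]
    rw [if_neg hn1, if_neg hpar]
    cases hu : utilA f (3 * n + 1) d with
    | none => simp only [Option.map_none]
    | some r =>
      obtain ⟨v, d1⟩ := r
      simp only [Option.map_some]
      rw [Std.HashMap.getD_insert_self]

theorem utilA_eq_lengthB (f : Nat) : ∀ (n : Int) (d : Std.HashMap Int Int),
    d[(1 : Int)]? = some 1 → utilA f n d = lengthB f n d := by
  induction f with
  | zero => intro n d _; simp [utilA, lengthB, pathB]
  | succ f ih =>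
    intro n d hd
    cases h : d[n]? with
    | some v =>
      rw [lengthB_memo (f+1) (Nat.succ_pos f) n v d h]
      simp [utilA, h]
    | none =>
      have hn1 : n ≠ 1 := by intro he; rw [he, hd] at h; simp at h
      rw [utilA_unfold f n d h hn1, lengthB_unfold f n d h, ih (pvStep n) d hd]
      cases hu : lengthB f (pvStep n) d with
      | none => rfl
      | some r => simp only [Option.map_some, Int.add_comm]

theorem utilA_first (f : Nat) : ∀ (v : Int),
    utilA f v (Std.HashMap.emptyWithCapacity : Std.HashMap Int Int) =
      lengthB f v ((Std.HashMap.emptyWithCapacity : Std.HashMap Int Int).insert 1 1) := by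
  induction f with
  | zero => intro v; simp [utilA, lengthB, pathB]
  | succ f ih =>
    intro v
    have hemp : (Std.HashMap.emptyWithCapacity : Std.HashMap Int Int)[v]? = none := by
      simp
    by_cases hv : v = 1
    · subst hv
      have h1 : ((Std.HashMap.emptyWithCapacity : Std.HashMap Int Int).insert 1 1)[(1 : Int)]? = some 1 :=
        Std.HashMap.getElem?_insert_self
      rw [lengthB_memo (f+1) (Nat.succ_pos f) 1 1 _ h1]
      simp only [utilA, hemp, if_true]
      rw [Std.HashMap.getD_insert_self]
    · have h0 : ((Std.HashMap.emptyWithCapacity : Std.HashMap Int Int).insert 1 1)[v]? = none := by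
        rw [hmGet_insert_of_ne _ _ hv]; exact hemp
      rw [utilA_unfold f v _ hemp hv, lengthB_unfold f v _ h0, ih (pvStep v)]
      cases hu : lengthB f (pvStep v) ((Std.HashMap.emptyWithCapacity : Std.HashMap Int Int).insert 1 1) with
      | none => rfl
      | some r => simp only [Option.map_some, Int.add_comm]

theorem utilA_preserve (f : Nat) : ∀ (n : Int) (d : Std.HashMap Int Int) (r : Int × Std.HashMap Int Int),
    utilA f n d = some r → d[(1 : Int)]? = some 1 → r.2[(1 : Int)]? = some 1 := by
  induction f with
  | zero => intro n d r hr _; simp [utilA] at hr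
  | succ f ih =>
    intro n d r hr hd
    cases h : d[n]? with
    | some v =>
      simp only [utilA, h, Option.some.injEq] at hr
      rw [← hr]
      exact hd
    | none =>
      have hn1 : n ≠ 1 := by intro he; rw [he, hd] at h; simp at h
      rw [utilA_unfold f n d h hn1] at hr
      cases hu : utilA f (pvStep n) d with
      | none => rw [hu] at hr; simp at hr
      | some r1 =>
        rw [hu] at hr
        simp only [Option.map_some, Option.some.injEq] at hr
        rw [← hr]
        rw [hmGet_insert_of_ne _ _ (Ne.symm hn1)]
        exact ih (pvStep n) d r1 hu hd

theorem utilA_empty_one (f : Nat) : ∀ (n : Int) (r : Int × Std.HashMap Int Int),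
    utilA f n (Std.HashMap.emptyWithCapacity : Std.HashMap Int Int) = some r → r.2[(1 : Int)]? = some 1 := by
  induction f with
  | zero => intro n r hr; simp [utilA] at hr
  | succ f ih =>
    intro n r hr
    have hemp : (Std.HashMap.emptyWithCapacity : Std.HashMap Int Int)[n]? = none := by
      simp
    by_cases hn1 : n = 1
    · subst hn1
      simp only [utilA, hemp, if_true, Option.some.injEq] at hr
      rw [← hr]
      exact Std.HashMap.getElem?_insert_self
    · rw [utilA_unfold f n _ hemp hn1] at hr
      cases hu : utilA f (pvStep n) (Std.HashMap.emptyWithCapacity : Std.HashMap Int Int) with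
      | none => rw [hu] at hr; simp at hr
      | some r1 =>
        rw [hu] at hr
        simp only [Option.map_some, Option.some.injEq] at hr
        rw [← hr]
        rw [hmGet_insert_of_ne _ _ (Ne.symm hn1)]
        exact ih (pvStep n) r1 hu

theorem utilA_getD (f : Nat) (n : Int) (d : Std.HashMap Int Int) (v : Int) (d' : Std.HashMap Int Int)
    (h : utilA f n d = some (v, d')) : d'.getD n 0 = v := by
  cases f with
  | zero => simp [utilA] at h
  | succ f =>
    cases hm : d[n]? with
    | some w =>
      simp only [utilA, hm, Option.some.injEq] at h
      injection h with h1 h2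
      subst h1; subst h2
      simp [Std.HashMap.getD_eq_getD_getElem?, hm]
    | none =>
      by_cases hn1 : n = 1
      · subst hn1
        simp only [utilA, hm, if_true, Option.some.injEq, Prod.mk.injEq] at h
        rw [← h.2, ← h.1]
      · rw [utilA_unfold f n d hm hn1] at h
        cases hu : utilA f (pvStep n) d with
        | none => rw [hu] at h; simp at h
        | some r1 =>
          rw [hu] at h
          simp only [Option.map_some, Option.some.injEq, Prod.mk.injEq] at h
          rw [← h.2, ← h.1, Std.HashMap.getD_insert_self]

theorem loop_eq : ∀ (xs : List Int) (num l : Int) (d : Std.HashMap Int Int),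
    d[(1 : Int)]? = some 1 → loopA xs num l d = loopB xs num l d := by
  intro xs
  induction xs with
  | nil => intro num l d _; rfl
  | cons i rest ih =>
    intro num l d hd
    cases h : d[i]? with
    | some v =>
      have hv : d.getD i 0 = v := by simp [Std.HashMap.getD_eq_getD_getElem?, h]
      rw [loopA, loopB, lengthB_memo pvFuel (by norm_num [pvFuel]) i v d h]
      simp only [h, hv]
      by_cases hl : l < v
      · simp [hl, ih i v d hd]
      · simp [hl, ih num l d hd]
    | none =>
      rw [loopA, loopB, ← utilA_eq_lengthB pvFuel i d hd]
      cases hu : utilA pvFuel i d with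
      | none => simp [h]
      | some r =>
        obtain ⟨v, d1⟩ := r
        have hv : d1.getD i 0 = v := utilA_getD pvFuel i d v d1 hu
        have hd1 : d1[(1 : Int)]? = some 1 := utilA_preserve pvFuel i d (v, d1) hu hd
        simp only [h, Option.map_some, hv]
        by_cases hl : l < v
        · simp [hl, ih i v d1 hd1]
        · simp [hl, ih num l d1 hd1]

-- ===== VERDICT (by name: the statement is the Claim_ definition above) =====
theorem solve_spec : Claim_equal_solve := by
  intro n _ _
  unfold Spec_solve solve solve_alt
  rw [utilA_first pvFuel n]
  cases h : lengthB pvFuel n ((Std.HashMap.emptyWithCapacity : Std.HashMap Int Int).insert 1 1) with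
  | none => rfl
  | some r =>
    obtain ⟨w, d⟩ := r
    have hd : d[(1 : Int)]? = some 1 := by
      apply utilA_empty_one pvFuel n (w, d)
      rw [utilA_first pvFuel n, h]
    show (loopA (PySem.List.pyRange 1 n 1) (-1) 0 d).getD (-1)
       = (loopB (PySem.List.pyRange 1 n 1) (-1) 0 d).getD (-1)
    rw [loop_eq (PySem.List.pyRange 1 n 1) (-1) 0 d hd]
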